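-- pv_equiv track=rewrite | github.com/HaykuhiGhalamdaryan/CHP | MixedMethod.py | _fill_square_matrix
-- ===== SOURCE A (Python) =====
-- import math
--
-- def _fill_square_matrix(text: str) -> list:
--     n = math.ceil(math.sqrt(len(text)))
--     matrix = [[' ' for _ in range(n)] for _ in range(n)]
--     k = 0
--     for i in range(n):
--         for j in range(n):
--             if k < len(text):
--                 matrix[i][j] = text[k]
--                 k += 1
--     return matrix
-- ===== SOURCE B (Python) =====
-- import math
--
-- def _fill_square_matrix(text: str) -> list:
--     n = math.ceil(math.sqrt(len(text)))
--     padded = text + ' ' * (n * n - len(text))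
--     return [list(padded[i * n:(i + 1) * n]) for i in range(n)]
-- ===== Notes on version B (the rewrite author's own statement) =====
-- stated objective: simpler
-- what changed: Replaces the preallocated blank matrix, nested per-cell loops and running cursor with a bounds check by a single up-front padding of the text followed by slicing it into n consecutive length-n chunks.
import Mathlib
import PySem

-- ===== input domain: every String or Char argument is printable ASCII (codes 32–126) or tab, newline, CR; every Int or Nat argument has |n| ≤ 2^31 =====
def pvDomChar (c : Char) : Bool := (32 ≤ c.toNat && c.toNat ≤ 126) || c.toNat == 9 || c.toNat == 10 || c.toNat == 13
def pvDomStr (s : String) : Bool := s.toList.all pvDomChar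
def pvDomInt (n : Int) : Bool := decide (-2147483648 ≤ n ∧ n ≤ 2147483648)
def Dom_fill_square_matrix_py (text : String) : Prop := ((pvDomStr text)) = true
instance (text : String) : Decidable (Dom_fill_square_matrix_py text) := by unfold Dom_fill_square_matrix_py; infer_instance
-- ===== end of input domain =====

-- B pads the text to n*n characters up front and slices it into n length-n chunks,
-- instead of A's blank matrix, nested per-cell loops, cursor k and bounds check.

-- math.ceil(math.sqrt(L)) for a natural L (exact on this integer domain)
def pyCeilSqrt (L : Nat) : Nat :=
  if Nat.sqrt L * Nat.sqrt L = L then Nat.sqrt L else Nat.sqrt L + 1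

-- ===== PORT A =====
-- literal port: blank n×n matrix, nested loops over i, j with cursor k;
-- matrix[i][j] = text[k] is the in-place update of row i, written back after the inner loop
def fill_square_matrix_py (text : String) : List (List String) :=
  let s := text.toList
  let L := s.length
  let n := pyCeilSqrt L
  let matrix := List.replicate n (List.replicate n " ")
  let res := (List.range n).foldl (fun (st : List (List String) × Nat) i =>
    let inner := (List.range n).foldl (fun (st2 : List String × Nat) j =>
      if st2.2 < L then (st2.1.set j (toString (s.getD st2.2 ' ')), st2.2 + 1) else st2)
      (st.1.getD i [], st.2)
    (st.1.set i inner.1, inner.2)) (matrix, 0)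
  res.1

-- ===== PORT B =====
-- padded[i*n:(i+1)*n] with 0 ≤ i*n is exactly (drop (i*n)).take n
def fill_square_matrix_py_alt (text : String) : List (List String) :=
  let s := text.toList
  let n := pyCeilSqrt s.length
  let padded := s ++ List.replicate (n * n - s.length) ' '
  (List.range n).map (fun i => ((padded.drop (i * n)).take n).map (fun c => toString c))

-- ===== PRECONDITION & SPEC =====
def Spec_fill_square_matrix_py (text : String) (out : List (List String)) : Prop := out = fill_square_matrix_py_alt text
instance (text : String) (out : List (List String)) : Decidable (Spec_fill_square_matrix_py text out) := by unfold Spec_fill_square_matrix_py; infer_instance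

-- ===== CLAIM (what is proved, stated in full; the proofs are below) =====
def Claim_equal_fill_square_matrix_py : Prop := ∀ (text : String), Dom_fill_square_matrix_py text → Spec_fill_square_matrix_py text (fill_square_matrix_py text)

-- ===== LEMMAS AND PROOFS =====

theorem le_sq_pyCeilSqrt (L : Nat) : L ≤ pyCeilSqrt L * pyCeilSqrt L := by
  unfold pyCeilSqrt
  split_ifs with h
  · omega
  · have h : L < (Nat.sqrt L + 1) * (Nat.sqrt L + 1) := by
      have := Nat.lt_succ_sqrt' L
      simpa [pow_two, Nat.succ_eq_add_one] using this
    omega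

-- the value written into cell (i*n+j), as both sides compute it
def cellVal (s : List Char) (idx : Nat) : String :=
  if idx < s.length then toString (s.getD idx ' ') else " "

def rowSpec (s : List Char) (n i : Nat) : List String :=
  (List.range n).map (fun j => cellVal s (i * n + j))

theorem inner_fold (s : List Char) (n : Nat) (k0 : Nat) (hk : k0 ≤ s.length) :
    ∀ m, m ≤ n →
    (List.range m).foldl (fun (st2 : List String × Nat) j =>
      if st2.2 < s.length then (st2.1.set j (toString (s.getD st2.2 ' ')), st2.2 + 1) else st2)
      (List.replicate n " ", k0)
    = ((List.range m).map (fun j => cellVal s (k0 + j)) ++ List.replicate (n - m) " ",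
       min (k0 + m) s.length) := by
  intro m
  induction m with
  | zero => intro _; simp [Nat.min_eq_left hk]
  | succ m ih =>
    intro hmn
    rw [List.range_succ, List.foldl_append, ih (by omega)]
    simp only [List.foldl_cons, List.foldl_nil, List.map_append, List.map_cons, List.map_nil]
    by_cases hc : k0 + m < s.length
    · rw [if_pos (by omega)]
      have hlen : ((List.range m).map (fun j => cellVal s (k0 + j))).length = m := by simp
      have hrep : (List.replicate (n - m) " " : List String)
          = " " :: List.replicate (n - m - 1) " " := by
        have : n - m = (n - m - 1) + 1 := by omega
        rw [this]; rfl
      rw [List.set_append_right _ _ (by omega), hlen, hrep]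
      simp only [Nat.sub_self, List.set_cons_zero]
      rw [List.append_assoc]
      simp only [Prod.mk.injEq]
      refine ⟨?_, by omega⟩
      have hmin : min (k0 + m) s.length = k0 + m := by omega
      rw [hmin]
      simp [cellVal, hc, Nat.sub_sub]
    · rw [if_neg (by omega)]
      have hrep : (List.replicate (n - m) " " : List String)
          = " " :: List.replicate (n - (m + 1)) " " := by
        have : n - m = (n - (m + 1)) + 1 := by omega
        rw [this]; rfl
      rw [hrep]
      simp only [Prod.mk.injEq]
      refine ⟨?_, by omega⟩
      rw [List.append_assoc]
      congr 2
      simp [cellVal, hc]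

theorem inner_row_eq (s : List Char) (n m : Nat) :
    ((List.range n).map (fun j => cellVal s (min (m * n) s.length + j)))
      = rowSpec s n m := by
  unfold rowSpec
  apply List.map_congr_left
  intro j hj
  simp only [List.mem_range] at hj
  by_cases h : m * n ≤ s.length
  · rw [Nat.min_eq_left h]
  · have h1 : ¬ (s.length + j < s.length) := by omega
    have h2 : ¬ (m * n + j < s.length) := by omega
    rw [Nat.min_eq_right (by omega)]
    simp [cellVal, h1, h2]

theorem outer_fold (s : List Char) (n : Nat) :
    ∀ m, m ≤ n →
    (List.range m).foldl (fun (st : List (List String) × Nat) i =>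
      let inner := (List.range n).foldl (fun (st2 : List String × Nat) j =>
        if st2.2 < s.length then (st2.1.set j (toString (s.getD st2.2 ' ')), st2.2 + 1) else st2)
        (st.1.getD i [], st.2)
      (st.1.set i inner.1, inner.2)) (List.replicate n (List.replicate n " "), 0)
    = ((List.range n).map (fun i => if i < m then rowSpec s n i else List.replicate n " "),
       min (m * n) s.length) := by
  intro m
  induction m with
  | zero =>
    intro _
    simp only [List.range_zero, List.foldl_nil, Nat.zero_mul, Nat.min_eq_left (Nat.zero_le _),
      Prod.mk.injEq]
    refine ⟨?_, trivial⟩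
    apply List.ext_getElem <;> simp
  | succ m ih =>
    intro hmn
    rw [List.range_succ, List.foldl_append, ih (by omega)]
    simp only [List.foldl_cons, List.foldl_nil]
    have hgetD : ((List.range n).map
        (fun i => if i < m then rowSpec s n i else List.replicate n " ")).getD m []
        = List.replicate n " " := by
      rw [List.getD_eq_getElem _ _ (by simpa using (by omega : m < n))]
      simp
    rw [hgetD, inner_fold s n (min (m * n) s.length) (Nat.min_le_right _ _) n (le_refl n)]
    simp only [Nat.sub_self, List.replicate_zero, List.append_nil, Prod.mk.injEq]
    refine ⟨?_, by simp only [Nat.succ_mul]; omega⟩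
    · rw [inner_row_eq s n m]
      apply List.ext_getElem
      · simp
      · intro idx h1 h2
        simp only [List.length_set, List.length_map, List.length_range] at h1
        rw [List.getElem_set]
        by_cases hidx : m = idx
        · subst hidx
          simp [List.getElem_map, List.getElem_range]
        · rw [if_neg hidx]
          simp only [List.getElem_map, List.getElem_range]
          by_cases hlt : idx < m
          · rw [if_pos hlt, if_pos (by omega)]
          · rw [if_neg hlt, if_neg (by omega)]

theorem padded_getElem (s : List Char) (n : Nat)
    (idx : Nat) (h : idx < (s ++ List.replicate (n * n - s.length) ' ').length) :
    (s ++ List.replicate (n * n - s.length) ' ')[idx] =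
      (if idx < s.length then s.getD idx ' ' else ' ') := by
  by_cases hc : idx < s.length
  · rw [if_pos hc, List.getElem_append_left hc, List.getD_eq_getElem _ _ hc]
  · rw [if_neg hc, List.getElem_append_right (by omega)]
    simp

theorem alt_row_eq (s : List Char) (n i : Nat) (hi : i < n) (hn : s.length ≤ n * n) :
    (((s ++ List.replicate (n * n - s.length) ' ').drop (i * n)).take n).map
      (fun c => toString c) = rowSpec s n i := by
  have hplen : (s ++ List.replicate (n * n - s.length) ' ').length = n * n := by
    simp; omega
  have hin : i * n + n ≤ n * n := by
    have : (i + 1) * n ≤ n * n := Nat.mul_le_mul_right n (by omega)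
    simpa [Nat.succ_mul] using this
  apply List.ext_getElem
  · simp [rowSpec]; omega
  · intro j h1 h2
    simp only [List.length_map, List.length_take, List.length_drop, hplen] at h1
    have hj : j < n := by omega
    simp only [List.getElem_map, List.getElem_take, List.getElem_drop]
    rw [padded_getElem s n (i * n + j) (by omega)]
    simp only [rowSpec, cellVal, List.getElem_map, List.getElem_range]
    split_ifs <;> rfl

-- ===== VERDICT (by name: the statement is the Claim_ definition above) =====
theorem fill_square_matrix_py_spec : Claim_equal_fill_square_matrix_py := by
  intro text _
  unfold Spec_fill_square_matrix_py fill_square_matrix_py fill_square_matrix_py_alt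
  simp only []
  set s := text.toList with hs
  set n := pyCeilSqrt s.length with hn
  have hle : s.length ≤ n * n := le_sq_pyCeilSqrt s.length
  rw [outer_fold s n n (le_refl n)]
  apply List.ext_getElem
  · simp
  · intro i h1 h2
    simp only [List.length_map, List.length_range] at h1
    simp only [List.getElem_map, List.getElem_range]
    rw [if_pos h1, ← alt_row_eq s n i h1 hle]
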